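-- pv_equiv track=rewrite | github.com/gcnonato/fpython | vogaisporasteristicos.py | trocaVogaisConsecutivas
-- ===== SOURCE A (Python) =====
-- def trocaVogaisConsecutivas(s):
--     vogal = "aAeEiIoOuU"
--     tam = len(s)
--     if tam == 0:
--         return ''
--
--     if tam > 2 and s[0] in vogal and s[1] in vogal and s[2] in vogal:
--         return "*" + trocaVogaisConsecutivas(s[2:])
--
--     elif tam > 1 and s[0] in vogal and s[1] in vogal:
--         return "*" + trocaVogaisConsecutivas(s[2:])
--
--     else:
--         return s[0] + trocaVogaisConsecutivas(s[1:])
-- ===== SOURCE B (Python) =====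
-- def trocaVogaisConsecutivas(s):
--     vowels = set("aAeEiIoOuU")
--     out = []
--     i = 0
--     n = len(s)
--     while i < n:
--         if i + 1 < n and s[i] in vowels and s[i + 1] in vowels:
--             out.append('*')
--             i += 2
--         else:
--             out.append(s[i])
--             i += 1
--     return ''.join(out)
-- ===== Notes on version B (the rewrite author's own statement) =====
-- stated objective: faster
-- what changed: Replaced A's recursion that rebuilds a slice of the string at every step (and re-tests the redundant three-vowel case) with a single iterative pass over the characters using an index and an output accumulator.
import Mathlib
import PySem

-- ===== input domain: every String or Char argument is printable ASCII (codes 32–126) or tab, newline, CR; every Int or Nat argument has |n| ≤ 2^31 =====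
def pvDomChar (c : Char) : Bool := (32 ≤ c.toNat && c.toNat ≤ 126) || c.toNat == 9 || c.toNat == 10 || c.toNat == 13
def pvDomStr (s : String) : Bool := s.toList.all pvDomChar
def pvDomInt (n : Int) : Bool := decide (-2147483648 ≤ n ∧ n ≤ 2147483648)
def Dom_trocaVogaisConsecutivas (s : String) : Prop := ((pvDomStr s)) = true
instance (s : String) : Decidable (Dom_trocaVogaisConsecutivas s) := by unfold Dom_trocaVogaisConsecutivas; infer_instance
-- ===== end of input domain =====

-- B replaces A's recursion-with-slicing by a single iterative pass with an index and an
-- output accumulator (objective: faster — no O(n) slice per step; return value only, no mutation).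

-- ===== PORT A =====
-- vogal = "aAeEiIoOuU"
def pvVogal : List Char := "aAeEiIoOuU".toList

-- A's recursion, on the character list (PySem strings are defined on List Char);
-- s[2:] of c0::rest is rest.drop 1, s[1:] is rest.
def pvGoA : List Char → List Char
  | [] => []
  | c0 :: rest =>
    if 2 < (c0 :: rest).length ∧ pvVogal.contains c0
        ∧ pvVogal.contains rest[0]! ∧ pvVogal.contains rest[1]! then
      '*' :: pvGoA (rest.drop 1)
    else if 1 < (c0 :: rest).length ∧ pvVogal.contains c0 ∧ pvVogal.contains rest[0]! then
      '*' :: pvGoA (rest.drop 1)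
    else
      c0 :: pvGoA rest
  termination_by cs => cs.length
  decreasing_by all_goals simp

def trocaVogaisConsecutivas (s : String) : String := String.ofList (pvGoA s.toList)

-- ===== PORT B =====
-- B's while loop consumes two characters when both are vowels, else one; as the loop
-- advances its index i over s, this is exactly structural consumption of the char list.
-- vowels = set("aAeEiIoOuU") (a 10-char literal set; membership = list membership)
def pvVowels : List Char := PySem.Set.ofList "aAeEiIoOuU".toList
def pvIsVowel (c : Char) : Bool := pvVowels.contains c

def pvGoB : List Char → List Char
  | a :: b :: rest =>
    if pvIsVowel a && pvIsVowel b then '*' :: pvGoB rest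
    else a :: pvGoB (b :: rest)
  | cs => cs

def trocaVogaisConsecutivas_alt (s : String) : String := String.ofList (pvGoB s.toList)

-- ===== PRECONDITION & SPEC =====
def Spec_trocaVogaisConsecutivas (s : String) (out : String) : Prop := out = trocaVogaisConsecutivas_alt s
instance (s : String) (out : String) : Decidable (Spec_trocaVogaisConsecutivas s out) := by unfold Spec_trocaVogaisConsecutivas; infer_instance

-- ===== CLAIM (what is proved, stated in full; the proofs are below) =====
def Claim_equal_trocaVogaisConsecutivas : Prop := ∀ (s : String), Dom_trocaVogaisConsecutivas s → Spec_trocaVogaisConsecutivas s (trocaVogaisConsecutivas s)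

-- ===== LEMMAS AND PROOFS =====
theorem pvGoA_eq_pvGoB (cs : List Char) : pvGoA cs = pvGoB cs := by
  match cs with
  | [] => simp [pvGoA, pvGoB]
  | [c] => simp [pvGoA, pvGoB]
  | a :: b :: rest =>
    have ih : pvGoA rest = pvGoB rest := pvGoA_eq_pvGoB rest
    have ih2 : pvGoA (b :: rest) = pvGoB (b :: rest) := pvGoA_eq_pvGoB (b :: rest)
    have hb0 : (b :: rest)[0]! = b := by simp
    rw [pvGoA]
    by_cases hva : pvVogal.contains a = true
    · by_cases hvb : pvVogal.contains b = true
      · -- both vowels: whichever of A's two branches fires, the result is '*' :: pvGoA rest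
        have hres : pvGoB (a :: b :: rest) = '*' :: pvGoB rest := by
          rw [pvGoB, if_pos (by simp only [pvIsVowel, Bool.and_eq_true]; exact ⟨hva, hvb⟩)]
        split_ifs with h1 h2
        · simp only [List.drop_one, List.tail_cons, ih, hres]
        · simp only [List.drop_one, List.tail_cons, ih, hres]
        · exact absurd ⟨by simp, hva, by rw [hb0]; exact hvb⟩ h2
      · -- b not a vowel: both of A's branch conditions fail
        rw [if_neg (fun h => hvb (hb0 ▸ h.2.2.1)), if_neg (fun h => hvb (hb0 ▸ h.2.2)), ih2]
        rw [pvGoB, if_neg (by simp only [pvIsVowel, Bool.and_eq_true]; exact fun h => hvb h.2)]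
    · rw [if_neg (fun h => hva h.2.1), if_neg (fun h => hva h.2.1), ih2]
      rw [pvGoB, if_neg (by simp only [pvIsVowel, Bool.and_eq_true]; exact fun h => hva h.1)]
  termination_by cs.length

-- ===== VERDICT (by name: the statement is the Claim_ definition above) =====
theorem trocaVogaisConsecutivas_spec : Claim_equal_trocaVogaisConsecutivas := by
  intro s _
  unfold Spec_trocaVogaisConsecutivas trocaVogaisConsecutivas trocaVogaisConsecutivas_alt
  rw [pvGoA_eq_pvGoB]
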